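-- pv_equiv track=rewrite | github.com/pocProjectWorkspace/intentos | core/kernel.py | _needs_preview
-- ===== SOURCE A (Python) =====
-- _SAFE_ACTIONS = {"list_files", "find_files", "get_disk_usage", "read_file", "get_metadata"}
--
-- _DESTRUCTIVE_ACTIONS = {"move_file", "rename_file", "delete_file"}
--
-- def _needs_preview(subtasks: list[dict]) -> bool:
--     """Decide whether this set of subtasks should trigger a dry-run preview."""
--     total_ops = 0
--     has_destructive = False
--
--     for st in subtasks:
--         action = st.get("action", "")
--         if action in _SAFE_ACTIONS:
--             continue
--         total_ops += 1
--         if action in _DESTRUCTIVE_ACTIONS: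
--             has_destructive = True
--         # Compound actions (not in SAFE_ACTIONS, not a known primitive) are
--         # always treated as potentially large
--         if action not in _SAFE_ACTIONS and action not in _DESTRUCTIVE_ACTIONS:
--             has_destructive = True
--
--     return total_ops >= 5 or has_destructive
-- ===== SOURCE B (Python) =====
-- _SAFE_ACTIONS = {"list_files", "find_files", "get_disk_usage", "read_file", "get_metadata"}
--
-- _DESTRUCTIVE_ACTIONS = {"move_file", "rename_file", "delete_file"}
--
-- def _needs_preview(subtasks):
--     """Decide whether this set of subtasks should trigger a dry-run preview."""
--     actions = {st.get("action", "") for st in subtasks}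
--     return not actions.issubset(_SAFE_ACTIONS)
-- ===== Notes on version B (the rewrite author's own statement) =====
-- stated objective: simpler
-- what changed: Replaces A's accumulate-and-branch loop (op counter + destructive flag) with building the set of distinct actions and one subset test against the safe set; the counter and the destructive/compound distinction are dead since every non-safe action sets the flag.
import Mathlib
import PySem

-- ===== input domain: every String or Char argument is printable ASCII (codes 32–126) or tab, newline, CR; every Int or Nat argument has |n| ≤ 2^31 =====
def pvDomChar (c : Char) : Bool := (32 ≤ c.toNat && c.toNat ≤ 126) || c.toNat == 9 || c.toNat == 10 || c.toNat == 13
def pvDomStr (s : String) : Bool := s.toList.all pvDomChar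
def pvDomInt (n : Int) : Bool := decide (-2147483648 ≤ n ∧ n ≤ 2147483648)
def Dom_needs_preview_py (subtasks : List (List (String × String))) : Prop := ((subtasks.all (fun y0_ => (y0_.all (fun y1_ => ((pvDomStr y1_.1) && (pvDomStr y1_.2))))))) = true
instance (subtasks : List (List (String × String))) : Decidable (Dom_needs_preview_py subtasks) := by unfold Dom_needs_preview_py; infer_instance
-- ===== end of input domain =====

-- B builds the set of distinct actions and asks one subset question of the safe set,
-- instead of A's loop accumulating an op counter and a destructive flag (simpler).

-- module constants (shared by A and B, as in the Python module)
def pvSafeActions : PySem.Set String :=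
  PySem.Set.ofList ["list_files", "find_files", "get_disk_usage", "read_file", "get_metadata"]

def pvDestructiveActions : PySem.Set String :=
  PySem.Set.ofList ["move_file", "rename_file", "delete_file"]

-- ===== PORT A =====
-- loop body of A's for-loop (Lean form of the loop over (total_ops, has_destructive))
def pvStepA (s : Int × Bool) (st : List (String × String)) : Int × Bool :=
  let action := (PySem.Dict.mk st).getD "action" ""
  if pvSafeActions.contains action then s
  else
    let total_ops := s.1 + 1
    let has_destructive := if pvDestructiveActions.contains action then true else s.2
    let has_destructive :=
      if !pvSafeActions.contains action && !pvDestructiveActions.contains action then true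
      else has_destructive
    (total_ops, has_destructive)

def needs_preview_py (subtasks : List (List (String × String))) : Bool :=
  let r := subtasks.foldl pvStepA (0, false)
  decide (r.1 ≥ 5) || r.2

-- ===== PORT B =====
def needs_preview_py_alt (subtasks : List (List (String × String))) : Bool :=
  let actions : PySem.Set String :=
    PySem.Set.ofList (subtasks.map (fun st => (PySem.Dict.mk st).getD "action" ""))
  !(PySem.Set.issubset actions pvSafeActions)

-- ===== PRECONDITION & SPEC =====
def Spec_needs_preview_py (subtasks : List (List (String × String))) (out : Bool) : Prop := out = needs_preview_py_alt subtasks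
instance (subtasks : List (List (String × String))) (out : Bool) : Decidable (Spec_needs_preview_py subtasks out) := by unfold Spec_needs_preview_py; infer_instance

-- ===== CLAIM (what is proved, stated in full; the proofs are below) =====
def Claim_equal_needs_preview_py : Prop := ∀ (subtasks : List (List (String × String))), Dom_needs_preview_py subtasks → Spec_needs_preview_py subtasks (needs_preview_py subtasks)

-- ===== LEMMAS AND PROOFS =====

-- shorthand for "this subtask's action is not in the safe set" (proof-side only)
def pvNonSafe (st : List (String × String)) : Bool :=
  !decide ((PySem.Dict.mk st).getD "action" "" ∈ pvSafeActions)

theorem pv_step_safe (s : Int × Bool) (st : List (String × String))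
    (h : (PySem.Dict.mk st).getD "action" "" ∈ pvSafeActions) : pvStepA s st = s := by
  simp [pvStepA, h]

theorem pv_step_nonsafe (s : Int × Bool) (st : List (String × String))
    (h : ¬ (PySem.Dict.mk st).getD "action" "" ∈ pvSafeActions) :
    pvStepA s st = (s.1 + 1, true) := by
  by_cases hd : (PySem.Dict.mk st).getD "action" "" ∈ pvDestructiveActions <;> simp [pvStepA, h, hd]

-- invariant of A's loop: fst counts the non-safe actions, snd records whether one occurred
theorem pv_fold_invariant (l : List (List (String × String))) (n : Int) (d : Bool) :
    l.foldl pvStepA (n, d) = (n + (l.countP pvNonSafe : Int), d || l.any pvNonSafe) := by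
  induction l generalizing n d with
  | nil => simp
  | cons st rest ih =>
    rw [List.foldl_cons]
    by_cases h : (PySem.Dict.mk st).getD "action" "" ∈ pvSafeActions
    · rw [pv_step_safe _ _ h, ih]
      simp [pvNonSafe, h]
    · rw [pv_step_nonsafe _ _ h, ih]
      simp [pvNonSafe, h, Prod.ext_iff]
      omega

theorem pv_B_eq_any (l : List (List (String × String))) :
    needs_preview_py_alt l = l.any pvNonSafe := by
  simp only [needs_preview_py_alt]
  by_cases h : ∀ x ∈ PySem.Set.ofList (l.map (fun st => (PySem.Dict.mk st).getD "action" "")),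
      x ∈ pvSafeActions
  · rw [(PySem.Set.issubset_iff _ _).mpr h]
    symm
    rw [show (!true) = false from rfl, List.any_eq_false]
    intro st hst
    simp only [pvNonSafe, Bool.not_eq_true', decide_eq_false_iff_not, not_not]
    exact h _ ((PySem.Set.mem_ofList _ _).mpr (List.mem_map_of_mem hst))
  · have hb : PySem.Set.issubset
        (PySem.Set.ofList (l.map (fun st => (PySem.Dict.mk st).getD "action" ""))) pvSafeActions
        = false := by
      rcases hxx : PySem.Set.issubset
          (PySem.Set.ofList (l.map (fun st => (PySem.Dict.mk st).getD "action" ""))) pvSafeActions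
      · rfl
      · exact absurd ((PySem.Set.issubset_iff _ _).mp hxx) h
    rw [hb]
    rw [not_forall] at h
    simp only [not_forall, exists_prop] at h
    obtain ⟨x, hx, hnx⟩ := h
    rw [PySem.Set.mem_ofList, List.mem_map] at hx
    obtain ⟨st, hst, rfl⟩ := hx
    symm
    rw [show (!false) = true from rfl, List.any_eq_true]
    exact ⟨st, hst, by simp [pvNonSafe, hnx]⟩

-- ===== VERDICT (by name: the statement is the Claim_ definition above) =====
theorem needs_preview_py_spec : Claim_equal_needs_preview_py := by
  intro subtasks _
  unfold Spec_needs_preview_py needs_preview_py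
  rw [pv_fold_invariant, pv_B_eq_any]
  simp only [zero_add]
  rcases h : subtasks.any pvNonSafe
  · have hc : subtasks.countP pvNonSafe = 0 :=
      List.countP_eq_zero.mpr (fun st hst => by
        simpa using (List.any_eq_false.mp h) st hst)
    simp [hc]
  · simp
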